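-- pv_equiv track=rewrite | github.com/tqa236/codeforces | Round694/strange_birthday_party/strange_birthday_party.py | strange_birthday_party
-- ===== SOURCE A (Python) =====
-- from collections import Counter
--
-- def strange_birthday_party(friends, presents):
--     count = 0
--     cost = 0
--     friend_counter = Counter(friends)
--     use_present = True
--     buy_present = 0
--     for index in sorted(friend_counter.keys(), reverse=True):
--         value = friend_counter[index]
--         if use_present and (index > count):
--             count += value
--             buy_present = count
--             if count >= index:
--                 use_present = False
--                 cost += presents[index - 1] * (count - index)
--                 buy_present = index
--         else:
--             cost += presents[index - 1] * value
--     return cost + sum(presents[:buy_present])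
-- ===== SOURCE B (Python) =====
-- def strange_birthday_party(friends, presents):
--     # Simpler: sort the wishes descending, hand out the cheapest presents
--     # one by one while they are still cheaper than paying cash, else pay cash.
--     cost = 0
--     j = 0
--     for k in sorted(friends, reverse=True):
--         if j < k:
--             cost += presents[j]
--             j += 1
--         else:
--             cost += presents[k - 1]
--     return cost
-- ===== Notes on version B (the rewrite author's own statement) =====
-- stated objective: simpler
-- what changed: Replaces A's Counter + four-variable state machine over distinct wish values (with a deferred sum(presents[:buy_present]) prefix) by a single greedy pass over the full descending-sorted wish list with one pointer into the cheapest presents, accumulating the cost directly.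
-- outside the precondition, e.g. on strange_birthday_party([4, 6], [7]): A returns 7, B raises IndexError; on strange_birthday_party([2], []): A returns 0, B raises IndexError
import Mathlib
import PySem

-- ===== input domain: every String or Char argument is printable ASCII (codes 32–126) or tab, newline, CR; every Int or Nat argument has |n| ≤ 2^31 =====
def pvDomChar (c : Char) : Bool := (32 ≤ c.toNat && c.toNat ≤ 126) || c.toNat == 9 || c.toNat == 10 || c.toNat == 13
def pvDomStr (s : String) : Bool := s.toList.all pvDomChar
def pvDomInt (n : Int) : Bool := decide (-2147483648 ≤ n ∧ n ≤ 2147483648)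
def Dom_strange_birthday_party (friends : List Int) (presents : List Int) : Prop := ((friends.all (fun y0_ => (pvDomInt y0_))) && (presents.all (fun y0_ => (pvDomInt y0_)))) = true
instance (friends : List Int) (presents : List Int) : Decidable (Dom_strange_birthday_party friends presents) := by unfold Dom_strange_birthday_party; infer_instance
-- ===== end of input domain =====

-- B replaces A's Counter + state machine over distinct wish values by one greedy pass
-- over the descending-sorted wish list with a pointer into the cheapest presents (simpler).

-- ===== PORT A =====
-- one iteration of A's loop body; val is the Counter lookup (value = friend_counter[index])
def pvStepA (presents : List Int) (val : Int → Int) (s : Int × Int × Bool × Int) (index : Int) : Int × Int × Bool × Int :=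
  let count := s.1; let cost := s.2.1; let use_present := s.2.2.1; let buy_present := s.2.2.2
  let value := val index
  if use_present && decide (count < index) then
    let count' := count + value
    if decide (index ≤ count') then
      (count', cost + (PySem.List.pyGetD presents (index - 1) 0) * (count' - index), false, index)
    else
      (count', cost, use_present, count')
  else
    (count, cost + (PySem.List.pyGetD presents (index - 1) 0) * value, use_present, buy_present)

def strange_birthday_party (friends : List Int) (presents : List Int) : Int :=
  let friend_counter := PySem.Dict.counter friends
  let r := (PySem.List.sorted friend_counter.keys (fun x => x) true).foldl
             (pvStepA presents (fun k => friend_counter.getD k 0)) (0, 0, true, 0)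
  r.2.1 + (PySem.List.slice presents none (some r.2.2.2)).sum

-- ===== PORT B =====
def pvStepB (presents : List Int) (s : Int × Int) (k : Int) : Int × Int :=
  if s.2 < k then (s.1 + PySem.List.pyGetD presents s.2 0, s.2 + 1)
  else (s.1 + PySem.List.pyGetD presents (k - 1) 0, s.2)

def strange_birthday_party_alt (friends : List Int) (presents : List Int) : Int :=
  ((PySem.List.sorted friends (fun x => x) true).foldl (pvStepB presents) (0, 0)).1

-- ===== PRECONDITION & SPEC =====
-- Pre_ admits wishes down to 1-len(presents) (Python wraparound keeps k <= 0 well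
-- defined) and, when there are more friends than presents, wishes up to len(presents):
-- outside it A either raises IndexError or silently ignores friends whose wish exceeds
-- the catalogue size, while B raises IndexError when it runs out of presents.
def Pre_strange_birthday_party (friends : List Int) (presents : List Int) : Prop :=
  (∀ k ∈ friends, 1 - (presents.length : Int) ≤ k) ∧
    ((friends.length : Int) ≤ (presents.length : Int) ∨
      ∀ k ∈ friends, k ≤ (presents.length : Int))
instance (friends : List Int) (presents : List Int) : Decidable (Pre_strange_birthday_party friends presents) := by unfold Pre_strange_birthday_party; infer_instance

def pvWitness_strange_birthday_party : List Int × List Int := ([2, 1, 2], [3, 4])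

def Spec_strange_birthday_party (friends : List Int) (presents : List Int) (out : Int) : Prop := out = strange_birthday_party_alt friends presents
instance (friends : List Int) (presents : List Int) (out : Int) : Decidable (Spec_strange_birthday_party friends presents out) := by unfold Spec_strange_birthday_party; infer_instance

-- ===== CLAIM (what is proved, stated in full; the proofs are below) =====
def Claim_equal_strange_birthday_party : Prop := ∀ (friends : List Int) (presents : List Int), Dom_strange_birthday_party friends presents → Pre_strange_birthday_party friends presents → Spec_strange_birthday_party friends presents (strange_birthday_party friends presents)

-- ===== LEMMAS AND PROOFS =====

-- B's fold over v copies of k while the pointer stays strictly below k: it collects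
-- the v presents starting at position j.
lemma pvL1 (p : List Int) (v : Nat) (k cB j : Int)
    (h0 : 0 ≤ j) (h : j + v ≤ k) (hlen : j + v ≤ (p.length : Int)) :
    (List.replicate v k).foldl (pvStepB p) (cB, j)
      = (cB + ((p.drop j.toNat).take v).sum, j + v) := by
  induction v generalizing cB j with
  | zero => simp
  | succ v ih =>
      have hj : j < k := by push_cast at h; omega
      have hjl : j.toNat < p.length := by push_cast at hlen; omega
      have hstep : pvStepB p (cB, j) k = (cB + p[j.toNat], j + 1) := by
        simp [pvStepB, hj, PySem.List.pyGetD_eq_getElem p 0 h0 (by omega)]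
      have hrec := ih (cB + p[j.toNat]) (j + 1) (by omega) (by push_cast at h ⊢; omega)
        (by push_cast at hlen ⊢; omega)
      have hdrop : p.drop j.toNat = p[j.toNat] :: p.drop (j.toNat + 1) :=
        List.drop_eq_getElem_cons hjl
      rw [List.replicate_succ, List.foldl_cons, hstep, hrec]
      rw [Prod.mk.injEq]
      constructor
      · rw [show (j + 1).toNat = j.toNat + 1 by omega, hdrop, List.take_succ_cons,
          List.sum_cons]
        ring
      · push_cast; ring

-- B's fold over v copies of k once the pointer has reached k: each copy pays cash.
lemma pvL2 (p : List Int) (v : Nat) (k cB j : Int) (h : k ≤ j) :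
    (List.replicate v k).foldl (pvStepB p) (cB, j)
      = (cB + PySem.List.pyGetD p (k - 1) 0 * v, j) := by
  induction v generalizing cB with
  | zero => simp
  | succ v ih =>
      have : ¬ j < k := by omega
      rw [List.replicate_succ, List.foldl_cons]
      simp only [pvStepB, this, if_false]
      rw [ih]
      rw [Prod.mk.injEq]
      push_cast; constructor <;> ring

-- Main invariant: B's fold over the multiplicity-expanded list tracks A's grouped fold.
lemma pvMain (p : List Int) (val : Int → Int) (D : List Int)
    (count cost : Int) (use : Bool) (buy : Int)
    (hD : D.Pairwise (· > ·))
    (hS : (∀ k ∈ D, k ≤ (p.length : Int)) ∨ count + (D.map val).sum ≤ (p.length : Int))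
    (hval : ∀ k ∈ D, 1 ≤ val k)
    (huse : use = true → buy = count)
    (hfalse : use = false → ∀ k ∈ D, k ≤ buy)
    (hb0 : 0 ≤ buy) (hbl : buy ≤ (p.length : Int)) :
    ((D.flatMap (fun k => List.replicate (val k).toNat k)).foldl (pvStepB p)
        (cost + (p.take buy.toNat).sum, buy)).1
      = (D.foldl (pvStepA p val) (count, cost, use, buy)).2.1
        + (p.take ((D.foldl (pvStepA p val) (count, cost, use, buy)).2.2.2).toNat).sum
      ∧ 0 ≤ (D.foldl (pvStepA p val) (count, cost, use, buy)).2.2.2 := by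
  induction D generalizing count cost use buy with
  | nil => exact ⟨rfl, hb0⟩
  | cons k D ih =>
      rcases List.pairwise_cons.mp hD with ⟨hk, hD'⟩
      have hv : 1 ≤ val k := hval k (by simp)
      have hvn : ((val k).toNat : Int) = val k := Int.toNat_of_nonneg (by omega)
      have hval' : ∀ x ∈ D, 1 ≤ val x := fun x hx => hval x (by simp [hx])
      have hrest : 0 ≤ (D.map val).sum := List.sum_nonneg (by
        intro x hx
        rcases List.mem_map.mp hx with ⟨y, hy, rfl⟩
        linarith [hval' y hy])
      have hsum : (((k :: D).map val).sum : Int) = val k + (D.map val).sum := by simp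
      rw [hsum] at hS
      rw [List.flatMap_cons, List.foldl_append, List.foldl_cons]
      cases use with
      | false =>
          have hkb : k ≤ buy := hfalse rfl k (by simp)
          have hstepA : pvStepA p val (count, cost, false, buy) k
              = (count, cost + PySem.List.pyGetD p (k - 1) 0 * val k, false, buy) := by
            simp [pvStepA]
          have hB := pvL2 p (val k).toNat k (cost + (p.take buy.toNat).sum) buy hkb
          rw [hB, hstepA]
          have harr : cost + (p.take buy.toNat).sum
                + PySem.List.pyGetD p (k - 1) 0 * ((val k).toNat : Int)
              = (cost + PySem.List.pyGetD p (k - 1) 0 * val k) + (p.take buy.toNat).sum := by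
            rw [hvn]; ring
          rw [harr]
          exact ih count _ false buy hD'
            (hS.imp (fun h x hx => h x (by simp [hx])) (fun h => by linarith)) hval'
            (by simp) (fun _ x hx => hfalse rfl x (by simp [hx])) hb0 hbl
      | true =>
          have hbc : buy = count := huse rfl
          subst hbc
          by_cases hck : buy < k
          · -- A's use_present branch fires
            have hstepcond : (true && decide (buy < k)) = true := by simp [hck]
            by_cases htr : k ≤ buy + val k
            · -- the transition group: the first k - buy copies take presents, the rest pay cash
              have hkl : k ≤ (p.length : Int) := by
                rcases hS with h | h
                · exact h k (by simp)
                · linarith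
              have hstepA : pvStepA p val (buy, cost, true, buy) k
                  = (buy + val k,
                     cost + PySem.List.pyGetD p (k - 1) 0 * (buy + val k - k), false, k) := by
                simp [pvStepA, hck, htr]
              have hab : (val k).toNat = (k - buy).toNat + ((val k).toNat - (k - buy).toNat) := by
                omega
              rw [hab, List.replicate_add, List.foldl_append]
              have hL1 := pvL1 p (k - buy).toNat k (cost + (p.take buy.toNat).sum) buy hb0
                (by omega) (by omega)
              rw [hL1]
              have hjk : buy + ((k - buy).toNat : Int) = k := by omega
              rw [hjk]
              have hL2 := pvL2 p ((val k).toNat - (k - buy).toNat) k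
                (cost + (p.take buy.toNat).sum + ((p.drop buy.toNat).take (k - buy).toNat).sum)
                k le_rfl
              rw [hL2, hstepA]
              have htake : p.take k.toNat
                  = p.take buy.toNat ++ (p.drop buy.toNat).take (k - buy).toNat := by
                rw [show k.toNat = buy.toNat + (k - buy).toNat by omega, List.take_add]
              have harr : cost + (p.take buy.toNat).sum
                    + ((p.drop buy.toNat).take (k - buy).toNat).sum
                    + PySem.List.pyGetD p (k - 1) 0 * (((val k).toNat - (k - buy).toNat : Nat) : Int)
                  = (cost + PySem.List.pyGetD p (k - 1) 0 * (buy + val k - k))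
                    + (p.take k.toNat).sum := by
                rw [htake, List.sum_append,
                  show (((val k).toNat - (k - buy).toNat : Nat) : Int) = buy + val k - k by omega]
                ring
              rw [harr]
              exact ih (buy + val k) _ false k hD'
                (hS.imp (fun h x hx => h x (by simp [hx])) (fun h => by linarith)) hval'
                (by simp) (fun _ x hx => le_of_lt (hk x hx)) (by omega) hkl
            · -- the whole group still fits: all copies take presents
              have hstepA : pvStepA p val (buy, cost, true, buy) k
                  = (buy + val k, cost, true, buy + val k) := by
                simp [pvStepA, hck, htr]
              have hbl' : buy + val k ≤ (p.length : Int) := by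
                rcases hS with h | h
                · have := h k (by simp); omega
                · linarith
              have hL1 := pvL1 p (val k).toNat k (cost + (p.take buy.toNat).sum) buy hb0
                (by omega) (by omega)
              rw [hL1, hstepA]
              have htake : p.take (buy + val k).toNat
                  = p.take buy.toNat ++ (p.drop buy.toNat).take (val k).toNat := by
                rw [show (buy + val k).toNat = buy.toNat + (val k).toNat by omega, List.take_add]
              have harr : cost + (p.take buy.toNat).sum
                    + ((p.drop buy.toNat).take (val k).toNat).sum
                  = cost + (p.take (buy + val k).toNat).sum := by
                rw [htake, List.sum_append]; ring
              rw [show buy + ((val k).toNat : Int) = buy + val k by omega, harr]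
              exact ih (buy + val k) cost true (buy + val k) hD'
                (hS.imp (fun h x hx => h x (by simp [hx])) (fun h => by linarith)) hval'
                (fun _ => rfl) (by simp) (by omega) (by omega)
          · -- A's else branch with use_present still True: the wish is already covered
            have hkb : k ≤ buy := by omega
            have hstepA : pvStepA p val (buy, cost, true, buy) k
                = (buy, cost + PySem.List.pyGetD p (k - 1) 0 * val k, true, buy) := by
              simp [pvStepA, hck]
            have hB := pvL2 p (val k).toNat k (cost + (p.take buy.toNat).sum) buy hkb
            rw [hB, hstepA]
            have harr : cost + (p.take buy.toNat).sum
                  + PySem.List.pyGetD p (k - 1) 0 * ((val k).toNat : Int)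
                = (cost + PySem.List.pyGetD p (k - 1) 0 * val k) + (p.take buy.toNat).sum := by
              rw [hvn]; ring
            rw [harr]
            exact ih buy _ true buy hD'
              (hS.imp (fun h x hx => h x (by simp [hx])) (fun h => by linarith)) hval'
              (fun _ => rfl) (by simp) hb0 hbl

lemma pvFlatCount (c : Int → Nat) (D : List Int) (hD : D.Nodup) (x : Int) :
    (D.flatMap (fun k => List.replicate (c k) k)).count x = if x ∈ D then c x else 0 := by
  induction D with
  | nil => simp
  | cons k D ih =>
      rcases List.nodup_cons.mp hD with ⟨hk, hnd⟩
      rw [List.flatMap_cons, List.count_append, ih hnd, List.count_replicate]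
      by_cases hx : x = k
      · subst hx; simp [hk]
      · simp [hx, Ne.symm hx]

lemma pvFlatPairwise (c : Int → Nat) (D : List Int) (hD : D.Pairwise (· > ·)) :
    (D.flatMap (fun k => List.replicate (c k) k)).Pairwise (fun a b : Int => b ≤ a) := by
  induction D with
  | nil => simp
  | cons k D ih =>
      rcases List.pairwise_cons.mp hD with ⟨hk, hnd⟩
      rw [List.flatMap_cons]
      apply List.pairwise_append.mpr
      refine ⟨?_, ih hnd, ?_⟩
      · apply List.pairwise_replicate.mpr; right; rfl
      · intro a ha b hb
        have ha' := (List.eq_of_mem_replicate ha)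
        rcases List.mem_flatMap.mp hb with ⟨k', hk', hb'⟩
        have hb'' := List.eq_of_mem_replicate hb'
        subst ha'; subst hb''
        exact le_of_lt (hk _ hk')

-- the descending-sorted full list is the flatMap of the descending distinct keys with multiplicities
lemma pvSortedFlat (friends : List Int) :
    PySem.List.sorted friends (fun x => x) true
      = (PySem.List.sorted (PySem.Set.ofList friends) (fun x => x) true).flatMap
          (fun k => List.replicate (friends.count k) k) := by
  have hperm : (PySem.List.sorted (PySem.Set.ofList friends) (fun x => x) true).Perm
      (PySem.Set.ofList friends) := PySem.List.sorted_perm _ _ _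
  have hnd : (PySem.List.sorted (PySem.Set.ofList friends) (fun x => x) true).Nodup :=
    hperm.symm.nodup (PySem.Set.nodup_ofList _)
  have hge : (PySem.List.sorted (PySem.Set.ofList friends) (fun x => x) true).Pairwise
      (fun a b : Int => b ≤ a) := PySem.List.sorted_pairwise_rev _ _
  have hgt : (PySem.List.sorted (PySem.Set.ofList friends) (fun x => x) true).Pairwise
      (fun a b : Int => a > b) :=
    (hge.and hnd).imp (fun h => lt_of_le_of_ne h.1 (Ne.symm h.2))
  have hFperm : ((PySem.List.sorted (PySem.Set.ofList friends) (fun x => x) true).flatMap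
      (fun k => List.replicate (friends.count k) k)).Perm friends := by
    apply List.perm_iff_count.mpr
    intro x
    rw [pvFlatCount _ _ hnd]
    by_cases hx : x ∈ friends
    · have : x ∈ PySem.List.sorted (PySem.Set.ofList friends) (fun x => x) true := by
        rw [PySem.List.mem_sorted, PySem.Set.mem_ofList]; exact hx
      simp [this]
    · have : x ∉ PySem.List.sorted (PySem.Set.ofList friends) (fun x => x) true := by
        rw [PySem.List.mem_sorted, PySem.Set.mem_ofList]; exact hx
      simp [this, List.count_eq_zero.mpr hx]
  exact List.Perm.eq_of_pairwise (le := fun a b : Int => b ≤ a)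
    (fun a b _ _ h1 h2 => le_antisymm h2 h1)
    (PySem.List.sorted_pairwise_rev _ _)
    (pvFlatPairwise _ _ hgt)
    ((PySem.List.sorted_perm _ _ _).trans hFperm.symm)

-- ===== VERDICT (by name: the statement is the Claim_ definition above) =====
theorem strange_birthday_party_spec : Claim_equal_strange_birthday_party := by
  intro friends presents _ hpre
  unfold Spec_strange_birthday_party strange_birthday_party strange_birthday_party_alt
  dsimp only
  rw [PySem.Dict.keys_counter]
  -- the distinct wish values, descending
  have hperm : (PySem.List.sorted (PySem.Set.ofList friends) (fun x => x) true).Perm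
      (PySem.Set.ofList friends) := PySem.List.sorted_perm _ _ _
  have hnd : (PySem.List.sorted (PySem.Set.ofList friends) (fun x => x) true).Nodup :=
    hperm.symm.nodup (PySem.Set.nodup_ofList _)
  have hgt : (PySem.List.sorted (PySem.Set.ofList friends) (fun x => x) true).Pairwise
      (fun a b : Int => a > b) :=
    ((PySem.List.sorted_pairwise_rev _ _).and hnd).imp
      (fun h => lt_of_le_of_ne h.1 (Ne.symm h.2))
  have hmem : ∀ x ∈ PySem.List.sorted (PySem.Set.ofList friends) (fun x => x) true,
      x ∈ friends := by
    intro x hx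
    rw [PySem.List.mem_sorted, PySem.Set.mem_ofList] at hx
    exact hx
  have hval : ∀ x ∈ PySem.List.sorted (PySem.Set.ofList friends) (fun x => x) true,
      1 ≤ (PySem.Dict.counter friends).getD x 0 := by
    intro x hx
    rw [PySem.Dict.getD_counter]
    have : 0 < friends.count x := List.count_pos_iff.mpr (hmem x hx)
    omega
  have hfun : (fun k => List.replicate ((PySem.Dict.counter friends).getD k 0).toNat k)
      = fun k => List.replicate (friends.count k) k := by
    funext k
    rw [PySem.Dict.getD_counter]
    simp
  -- the multiplicities over the distinct keys sum to the number of friends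
  have hsum_eq : ((PySem.List.sorted (PySem.Set.ofList friends) (fun x => x) true).map
        (fun k => (PySem.Dict.counter friends).getD k 0)).sum = (friends.length : Int) := by
    have hlen : ((PySem.List.sorted (PySem.Set.ofList friends) (fun x => x) true).flatMap
        (fun k => List.replicate (friends.count k) k)).length = friends.length := by
      rw [← pvSortedFlat, PySem.List.length_sorted]
    rw [List.length_flatMap] at hlen
    simp only [List.length_replicate] at hlen
    have : (fun k => (PySem.Dict.counter friends).getD k 0)
        = fun k => ((friends.count k : Nat) : Int) := by
      funext k; rw [PySem.Dict.getD_counter]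
    rw [this, ← hlen]
    rw [show (fun k => ((friends.count k : Nat) : Int))
        = (fun n : Nat => (n : Int)) ∘ (fun k => friends.count k) from rfl,
      ← List.map_map, ← Nat.cast_list_sum]
  have hS : (∀ k ∈ PySem.List.sorted (PySem.Set.ofList friends) (fun x => x) true,
        k ≤ (presents.length : Int)) ∨
      (0 : Int) + ((PySem.List.sorted (PySem.Set.ofList friends) (fun x => x) true).map
        (fun k => (PySem.Dict.counter friends).getD k 0)).sum ≤ (presents.length : Int) := by
    rcases hpre.2 with h | h
    · right; rw [hsum_eq]; omega
    · left; exact fun x hx => h x (hmem x hx)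
  have hmain := pvMain presents (fun k => (PySem.Dict.counter friends).getD k 0)
    (PySem.List.sorted (PySem.Set.ofList friends) (fun x => x) true)
    0 0 true 0 hgt hS hval (fun _ => rfl) (by simp) le_rfl
    (by exact_mod_cast Nat.zero_le _)
  -- identify B's sorted list with the multiplicity expansion of the distinct keys
  rw [hfun, ← pvSortedFlat] at hmain
  simp only [Int.toNat_zero, List.take_zero, List.sum_nil, add_zero] at hmain
  rw [hmain.1, PySem.List.slice_to _ hmain.2]
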